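-- pv_equiv track=rewrite | github.com/sebacaccaro/tesi_magistrale | Valutazione/valutazione.py | standardScore
-- ===== SOURCE A (Python) =====
-- def errorBitMask(c, cp, cpp):
--     return [0 if c[i] == cp[i] == cpp[i] else 1 for i in range(len(c))]
--
-- def bitMaskToPos(bitmask):
--     ranges = []
--     current = []
--     for i in range(len(bitmask)):
--         value = bitmask[i]
--         if value == 0:
--             if len(current) > 0:
--                 ranges.append(current)
--                 current = []
--         elif value == 1:
--             current.append(i)
--     if len(current) > 0:
--         ranges.append(current)
--     return ranges
--
-- def errorChars(sentence, ranges):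
--     return ["".join([sentence[i] for i in r]) for r in ranges]
--
-- def standardScore(c, cp, cpp):
--     errors = bitMaskToPos(errorBitMask(c, cp, cpp))
--     c = errorChars(c, errors)
--     cp = errorChars(cp, errors)
--     cpp = errorChars(cpp, errors)
--     perturbation_errors = sum([1 for i in range(len(c)) if c[i] != cp[i]])
--     corrected_errors = sum(
--         [1 for i in range(len(c)) if c[i] != cp[i] and cpp[i] == c[i]])
--     introduced_errors = sum(
--         [1 for i in range(len(c)) if c[i] == cp[i] and cpp[i] != c[i]])
--     return {
--         "perturbation_errors": perturbation_errors,
--         "corrected_errors": corrected_errors,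
--         "introduced_errors": introduced_errors,
--     }
-- ===== SOURCE B (Python) =====
-- def standardScore(c, cp, cpp):
--     # One fused pass: maintain the current contiguous error run as three
--     # accumulated substrings and score each run as it closes.
--     perturbation = corrected = introduced = 0
--     in_run = False
--     cur_c = cur_cp = cur_cpp = ""
--
--     def score(p, co, intr):
--         if cur_c != cur_cp:
--             p += 1
--             if cur_cpp == cur_c:
--                 co += 1
--         elif cur_cpp != cur_c:
--             intr += 1
--         return p, co, intr
--
--     for i in range(len(c)):
--         if c[i] == cp[i] == cpp[i]:
--             if in_run:
--                 perturbation, corrected, introduced = score(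
--                     perturbation, corrected, introduced)
--                 in_run = False
--                 cur_c = cur_cp = cur_cpp = ""
--         else:
--             in_run = True
--             cur_c += c[i]
--             cur_cp += cp[i]
--             cur_cpp += cpp[i]
--     if in_run:
--         perturbation, corrected, introduced = score(
--             perturbation, corrected, introduced)
--     return {
--         "perturbation_errors": perturbation,
--         "corrected_errors": corrected,
--         "introduced_errors": introduced,
--     }
-- ===== Notes on version B (the rewrite author's own statement) =====
-- stated objective: alternative
-- what changed: Replaces A's four-stage pipeline (bitmask list, index-range extraction, three joined-substring lists, three separate counting passes) by one fused left-to-right pass that accumulates the current error run's three substrings and scores each run as it closes; no bitmask, index ranges or intermediate lists are built, though A's comprehension-based passes run faster in CPython.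
import Mathlib
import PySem

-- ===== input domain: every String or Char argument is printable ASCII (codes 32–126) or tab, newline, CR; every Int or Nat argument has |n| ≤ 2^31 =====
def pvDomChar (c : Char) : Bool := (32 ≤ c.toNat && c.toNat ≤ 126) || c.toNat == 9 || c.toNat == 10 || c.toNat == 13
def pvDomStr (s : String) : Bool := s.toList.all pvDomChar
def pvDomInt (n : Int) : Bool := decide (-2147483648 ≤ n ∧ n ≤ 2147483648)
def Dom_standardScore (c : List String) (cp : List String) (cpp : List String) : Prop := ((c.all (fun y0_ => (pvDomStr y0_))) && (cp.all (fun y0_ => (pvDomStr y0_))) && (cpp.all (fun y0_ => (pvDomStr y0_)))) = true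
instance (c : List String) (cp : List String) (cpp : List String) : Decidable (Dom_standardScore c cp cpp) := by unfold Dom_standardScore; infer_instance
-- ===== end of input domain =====

-- B replaces A's bitmask → index-ranges → joined-substring-lists → three counting passes
-- pipeline by one fused pass that scores each contiguous error run as it closes.

-- ===== PORT A =====
def pvBitMask (c cp cpp : List String) : List Int :=
  (PySem.List.pyRange 0 (PySem.List.len c) 1).map (fun i =>
    if PySem.List.pyGetD c i "" = PySem.List.pyGetD cp i "" ∧
       PySem.List.pyGetD cp i "" = PySem.List.pyGetD cpp i "" then 0 else 1)

def pvStepA (bm : List Int) (st : List (List Int) × List Int) (i : Int) :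
    List (List Int) × List Int :=
  let value := PySem.List.pyGetD bm i 0
  if value = 0 then
    (if 0 < st.2.length then (st.1 ++ [st.2], ([] : List Int)) else st)
  else if value = 1 then (st.1, st.2 ++ [i])
  else st
def pvBitMaskToPos (bm : List Int) : List (List Int) :=
  let st := (PySem.List.pyRange 0 (PySem.List.len bm) 1).foldl (pvStepA bm) ([], [])
  if 0 < st.2.length then st.1 ++ [st.2] else st.1

def pvErrorChars (sentence : List String) (ranges : List (List Int)) : List String :=
  ranges.map (fun r => PySem.Str.join "" (r.map (fun i => PySem.List.pyGetD sentence i "")))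

def pvSumPert (c' cp' : List String) : Int :=
  (((PySem.List.pyRange 0 (PySem.List.len c') 1).filter
      (fun i => decide (PySem.List.pyGetD c' i "" ≠ PySem.List.pyGetD cp' i ""))).map
    (fun _ => (1 : Int))).sum

def pvSumCorr (c' cp' cpp' : List String) : Int :=
  (((PySem.List.pyRange 0 (PySem.List.len c') 1).filter
      (fun i => decide (PySem.List.pyGetD c' i "" ≠ PySem.List.pyGetD cp' i "" ∧
                        PySem.List.pyGetD cpp' i "" = PySem.List.pyGetD c' i ""))).map
    (fun _ => (1 : Int))).sum

def pvSumIntr (c' cp' cpp' : List String) : Int :=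
  (((PySem.List.pyRange 0 (PySem.List.len c') 1).filter
      (fun i => decide (PySem.List.pyGetD c' i "" = PySem.List.pyGetD cp' i "" ∧
                        PySem.List.pyGetD cpp' i "" ≠ PySem.List.pyGetD c' i ""))).map
    (fun _ => (1 : Int))).sum

def standardScore (c : List String) (cp : List String) (cpp : List String) : List (String × Int) :=
  let errors := pvBitMaskToPos (pvBitMask c cp cpp)
  let c' := pvErrorChars c errors
  let cp' := pvErrorChars cp errors
  let cpp' := pvErrorChars cpp errors
  let perturbation_errors := pvSumPert c' cp'
  let corrected_errors := pvSumCorr c' cp' cpp'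
  let introduced_errors := pvSumIntr c' cp' cpp'
  [("perturbation_errors", perturbation_errors),
   ("corrected_errors", corrected_errors),
   ("introduced_errors", introduced_errors)]

structure PvBState where
  p : Int
  co : Int
  intr : Int
  inRun : Bool
  s1 : List Char
  s2 : List Char
  s3 : List Char
deriving DecidableEq, Repr

def pvScore (s1 s2 s3 : List Char) (acc : Int × Int × Int) : Int × Int × Int :=
  if s1 ≠ s2 then (acc.1 + 1, if s3 = s1 then acc.2.1 + 1 else acc.2.1, acc.2.2)
  else if s3 ≠ s1 then (acc.1, acc.2.1, acc.2.2 + 1)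
  else acc

def pvStepB (c cp cpp : List String) (st : PvBState) (i : Int) : PvBState :=
  if PySem.List.pyGetD c i "" = PySem.List.pyGetD cp i "" ∧
     PySem.List.pyGetD cp i "" = PySem.List.pyGetD cpp i "" then
    if st.inRun then
      let r := pvScore st.s1 st.s2 st.s3 (st.p, st.co, st.intr)
      ⟨r.1, r.2.1, r.2.2, false, [], [], []⟩
    else st
  else
    ⟨st.p, st.co, st.intr, true,
     st.s1 ++ (PySem.List.pyGetD c i "").toList,
     st.s2 ++ (PySem.List.pyGetD cp i "").toList,
     st.s3 ++ (PySem.List.pyGetD cpp i "").toList⟩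

def standardScore_alt (c : List String) (cp : List String) (cpp : List String) : List (String × Int) :=
  let fin := (PySem.List.pyRange 0 (PySem.List.len c) 1).foldl (pvStepB c cp cpp)
    ⟨0, 0, 0, false, [], [], []⟩
  let r := if fin.inRun then pvScore fin.s1 fin.s2 fin.s3 (fin.p, fin.co, fin.intr)
           else (fin.p, fin.co, fin.intr)
  [("perturbation_errors", r.1), ("corrected_errors", r.2.1), ("introduced_errors", r.2.2)]


-- ===== PRECONDITION & SPEC =====
-- Pre_ excludes exactly the inputs on which the Python A raises IndexError (cp, or cpp, shorter
-- than c); B raises there too.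
def Pre_standardScore (c : List String) (cp : List String) (cpp : List String) : Prop :=
  c.length ≤ cp.length ∧ c.length ≤ cpp.length
instance (c : List String) (cp : List String) (cpp : List String) : Decidable (Pre_standardScore c cp cpp) := by unfold Pre_standardScore; infer_instance

def pvWitness_standardScore : List String × List String × List String :=
  (["a", "b", "c"], ["a", "x", "c"], ["a", "b", "c"])

def Spec_standardScore (c : List String) (cp : List String) (cpp : List String) (out : List (String × Int)) : Prop := out = standardScore_alt c cp cpp
instance (c : List String) (cp : List String) (cpp : List String) (out : List (String × Int)) : Decidable (Spec_standardScore c cp cpp out) := by unfold Spec_standardScore; infer_instance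

-- ===== CLAIM (what is proved, stated in full; the proofs are below) =====
def Claim_equal_standardScore : Prop := ∀ (c : List String) (cp : List String) (cpp : List String), Dom_standardScore c cp cpp → Pre_standardScore c cp cpp → Spec_standardScore c cp cpp (standardScore c cp cpp)

-- ===== LEMMAS AND PROOFS =====
def pvJoin (sentence : List String) (r : List Int) : String :=
  PySem.Str.join "" (r.map (fun i => PySem.List.pyGetD sentence i ""))

def pvScoreStr (s1 s2 s3 : String) (acc : Int × Int × Int) : Int × Int × Int :=
  if s1 ≠ s2 then (acc.1 + 1, if s3 = s1 then acc.2.1 + 1 else acc.2.1, acc.2.2)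
  else if s3 ≠ s1 then (acc.1, acc.2.1, acc.2.2 + 1)
  else acc

def pvCnt (c cp cpp : List String) (ranges : List (List Int)) : Int × Int × Int :=
  ranges.foldl (fun acc r => pvScoreStr (pvJoin c r) (pvJoin cp r) (pvJoin cpp r) acc) (0, 0, 0)

def pvMk (c cp cpp : List String) (st : List (List Int) × List Int) : PvBState :=
  ⟨(pvCnt c cp cpp st.1).1, (pvCnt c cp cpp st.1).2.1, (pvCnt c cp cpp st.1).2.2,
   !st.2.isEmpty, (pvJoin c st.2).toList, (pvJoin cp st.2).toList, (pvJoin cpp st.2).toList⟩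

lemma pvChars_join_nil (ls : List (List Char)) : PySem.Chars.join [] ls = ls.flatten := by
  induction ls with
  | nil => simp [PySem.Chars.join_nil]
  | cons a t ih =>
    cases t with
    | nil => simp [PySem.Chars.join_singleton]
    | cons b t' => simp [PySem.Chars.join_cons_cons, ih]

lemma pvJoin_toList (s : List String) (r : List Int) :
    (pvJoin s r).toList = (r.map (fun i => (PySem.List.pyGetD s i "").toList)).flatten := by
  simp [pvJoin, PySem.Str.toList_join, pvChars_join_nil, List.map_map]
  rfl

lemma pvScore_toList (a b d : String) (acc : Int × Int × Int) :
    pvScore a.toList b.toList d.toList acc = pvScoreStr a b d acc := by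
  simp [pvScore, pvScoreStr, String.toList_inj]

lemma pvJoin_nil_toList (s : List String) : (pvJoin s []).toList = [] := by
  simp [pvJoin_toList]

lemma pvStep_comm (c cp cpp : List String) (n : Nat) (hn : n < c.length)
    (st : List (List Int) × List Int) :
    pvStepB c cp cpp (pvMk c cp cpp st) (n : Int)
      = pvMk c cp cpp (pvStepA (pvBitMask c cp cpp) st (n : Int)) := by
  have hbm : PySem.List.pyGetD (pvBitMask c cp cpp) (n : Int) 0
      = (if PySem.List.pyGetD c (n : Int) "" = PySem.List.pyGetD cp (n : Int) "" ∧
            PySem.List.pyGetD cp (n : Int) "" = PySem.List.pyGetD cpp (n : Int) "" then 0 else 1) := by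
    unfold pvBitMask
    rw [PySem.List.len_eq]
    exact PySem.List.pyGetD_map_pyRange _ c.length n 0 hn
  simp at hbm
  by_cases hcond : Option.getD (getElem? c n) "" = Option.getD (getElem? cp n) "" ∧ Option.getD (getElem? cp n) "" = Option.getD (getElem? cpp n) ""
  · -- non-error position: the run (if any) is closed and scored on both sides
    rcases st with ⟨ranges, cur⟩
    by_cases hcur : cur = []
    · subst hcur
      simp [pvStepB, pvStepA, hbm, hcond, pvMk]
    · have hlen : 0 < cur.length := List.length_pos_iff.mpr hcur
      simp [pvStepB, pvStepA, hbm, hcond, pvMk, hcur, hlen, pvScore_toList,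
            pvCnt, List.foldl_append, pvJoin_nil_toList]
  · -- error position: both sides extend the current run
    rcases st with ⟨ranges, cur⟩
    simp [pvStepB, pvStepA, hbm, hcond, pvMk, pvJoin_toList]

lemma pvInv (c cp cpp : List String) :
    ∀ n : Nat, n ≤ c.length →
      (PySem.List.pyRange 0 (n : Int) 1).foldl (pvStepB c cp cpp) ⟨0, 0, 0, false, [], [], []⟩
        = pvMk c cp cpp ((PySem.List.pyRange 0 (n : Int) 1).foldl
            (pvStepA (pvBitMask c cp cpp)) ([], [])) := by
  intro n
  induction n with
  | zero => intro _; simp [PySem.List.pyRange_one_eq_nil le_rfl, pvMk, pvCnt, pvJoin]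
  | succ m ih =>
    intro h
    have hm : m ≤ c.length := Nat.le_of_succ_le h
    have hcast : ((m + 1 : Nat) : Int) = (m : Int) + 1 := by push_cast; ring
    rw [hcast, PySem.List.pyRange_one_succ_right (by positivity), List.foldl_append,
        List.foldl_append, ih hm]
    simp only [List.foldl_cons, List.foldl_nil]
    exact pvStep_comm c cp cpp m (by omega) _

lemma pvGetD_append_lt {α : Type} (l : List α) (x : α) (i : Int) (d : α)
    (h0 : 0 ≤ i) (h : i < l.length) :
    PySem.List.pyGetD (l ++ [x]) i d = PySem.List.pyGetD l i d := by
  rw [PySem.List.pyGetD_eq_getElem _ d h0 (by simp; omega),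
      PySem.List.pyGetD_eq_getElem _ d h0 (by exact_mod_cast h)]
  exact List.getElem_append_left _

lemma pvGetD_append_last {α : Type} (l : List α) (x : α) (d : α) :
    PySem.List.pyGetD (l ++ [x]) (l.length : Int) d = x := by
  rw [PySem.List.pyGetD_eq_getElem _ d (by positivity) (by simp)]
  simp

lemma pvFilterSum_snoc (p q : Int → Bool) (L : Nat)
    (h : ∀ i : Int, 0 ≤ i → i < (L : Int) → p i = q i) :
    (((PySem.List.pyRange 0 ((L : Int) + 1) 1).filter p).map (fun _ => (1 : Int))).sum
      = (((PySem.List.pyRange 0 (L : Int) 1).filter q).map (fun _ => (1 : Int))).sum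
        + (if p (L : Int) then 1 else 0) := by
  rw [PySem.List.pyRange_one_succ_right (by positivity), List.filter_append,
      List.map_append, List.sum_append,
      List.filter_congr (fun i hi => h i (PySem.List.mem_pyRange_one.mp hi).1
        (PySem.List.mem_pyRange_one.mp hi).2)]
  congr 1
  split <;> simp_all

lemma pvErrorChars_snoc (s : List String) (rs : List (List Int)) (r : List Int) :
    pvErrorChars s (rs ++ [r]) = pvErrorChars s rs ++ [pvJoin s r] := by
  simp [pvErrorChars, pvJoin]

lemma pvErrorChars_length (s : List String) (rs : List (List Int)) :
    (pvErrorChars s rs).length = rs.length := by simp [pvErrorChars]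

-- the generic counting pass of A, over the joined substrings of the runs
lemma pvSumGen_eq (c cp cpp : List String) (P : String → String → String → Bool)
    (ranges : List (List Int)) :
    (((PySem.List.pyRange 0 (PySem.List.len (pvErrorChars c ranges)) 1).filter
        (fun i => P (PySem.List.pyGetD (pvErrorChars c ranges) i "")
                    (PySem.List.pyGetD (pvErrorChars cp ranges) i "")
                    (PySem.List.pyGetD (pvErrorChars cpp ranges) i ""))).map
      (fun _ => (1 : Int))).sum
      = ranges.foldl
          (fun acc r => acc + (if P (pvJoin c r) (pvJoin cp r) (pvJoin cpp r) then 1 else 0)) 0 := by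
  induction ranges using List.reverseRecOn with
  | nil => simp [pvErrorChars, PySem.List.pyRange_one_eq_nil le_rfl]
  | append_singleton rs r ih =>
    rw [pvErrorChars_snoc, pvErrorChars_snoc, pvErrorChars_snoc, PySem.List.len_eq]
    have hL : ((pvErrorChars c rs ++ [pvJoin c r]).length : Int)
        = ((rs.length : Nat) : Int) + 1 := by simp [pvErrorChars_length]
    rw [hL]
    have hstep := pvFilterSum_snoc
      (fun i => P (PySem.List.pyGetD (pvErrorChars c rs ++ [pvJoin c r]) i "")
                  (PySem.List.pyGetD (pvErrorChars cp rs ++ [pvJoin cp r]) i "")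
                  (PySem.List.pyGetD (pvErrorChars cpp rs ++ [pvJoin cpp r]) i ""))
      (fun i => P (PySem.List.pyGetD (pvErrorChars c rs) i "")
                  (PySem.List.pyGetD (pvErrorChars cp rs) i "")
                  (PySem.List.pyGetD (pvErrorChars cpp rs) i ""))
      rs.length
      (by
        intro i h0 hi
        have e1 := pvGetD_append_lt (pvErrorChars c rs) (pvJoin c r) i "" h0
          (by rw [pvErrorChars_length]; exact_mod_cast hi)
        have e2 := pvGetD_append_lt (pvErrorChars cp rs) (pvJoin cp r) i "" h0
          (by rw [pvErrorChars_length]; exact_mod_cast hi)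
        have e3 := pvGetD_append_lt (pvErrorChars cpp rs) (pvJoin cpp r) i "" h0
          (by rw [pvErrorChars_length]; exact_mod_cast hi)
        simp only [e1, e2, e3])
    rw [hstep, List.foldl_append, List.foldl_cons, List.foldl_nil]
    have h1 : PySem.List.pyGetD (pvErrorChars c rs ++ [pvJoin c r]) ((rs.length : Nat) : Int) ""
        = pvJoin c r := by
      rw [← pvErrorChars_length c rs]; exact pvGetD_append_last _ _ _
    have h2 : PySem.List.pyGetD (pvErrorChars cp rs ++ [pvJoin cp r]) ((rs.length : Nat) : Int) ""
        = pvJoin cp r := by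
      rw [← pvErrorChars_length cp rs]; exact pvGetD_append_last _ _ _
    have h3 : PySem.List.pyGetD (pvErrorChars cpp rs ++ [pvJoin cpp r]) ((rs.length : Nat) : Int) ""
        = pvJoin cpp r := by
      rw [← pvErrorChars_length cpp rs]; exact pvGetD_append_last _ _ _
    rw [← ih, PySem.List.len_eq]
    simp only [h1, h2, h3, pvErrorChars_length]

-- pvCnt, componentwise, as three additive folds
lemma pvCnt_eq_folds (c cp cpp : List String) (ranges : List (List Int)) :
    pvCnt c cp cpp ranges
      = (ranges.foldl (fun acc r => acc +
            (if decide (pvJoin c r ≠ pvJoin cp r) then 1 else 0)) 0,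
         ranges.foldl (fun acc r => acc +
            (if decide (pvJoin c r ≠ pvJoin cp r ∧ pvJoin cpp r = pvJoin c r) then 1 else 0)) 0,
         ranges.foldl (fun acc r => acc +
            (if decide (pvJoin c r = pvJoin cp r ∧ pvJoin cpp r ≠ pvJoin c r) then 1 else 0)) 0) := by
  induction ranges using List.reverseRecOn with
  | nil => simp [pvCnt]
  | append_singleton rs r ih =>
    simp only [pvCnt, List.foldl_append, List.foldl_cons, List.foldl_nil] at *
    rw [ih]
    simp only [pvScoreStr]
    split_ifs <;> simp_all


-- ===== VERDICT (by name: the statement is the Claim_ definition above) =====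
theorem standardScore_spec : Claim_equal_standardScore := by
  intro c cp cpp _ _
  unfold Spec_standardScore standardScore standardScore_alt pvBitMaskToPos
  dsimp only
  have hlen2 : (pvBitMask c cp cpp).length = c.length := by
    simp [pvBitMask, PySem.List.length_pyRange_one]
  simp only [PySem.List.len_eq, hlen2]
  rw [pvInv c cp cpp c.length le_rfl]
  set st := (PySem.List.pyRange 0 ((c.length : Nat) : Int) 1).foldl
    (pvStepA (pvBitMask c cp cpp)) (([], []) : List (List Int) × List Int) with hst
  have hfin : (if (pvMk c cp cpp st).inRun then
        pvScore (pvMk c cp cpp st).s1 (pvMk c cp cpp st).s2 (pvMk c cp cpp st).s3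
          ((pvMk c cp cpp st).p, (pvMk c cp cpp st).co, (pvMk c cp cpp st).intr)
      else ((pvMk c cp cpp st).p, (pvMk c cp cpp st).co, (pvMk c cp cpp st).intr))
      = pvCnt c cp cpp (if 0 < st.2.length then st.1 ++ [st.2] else st.1) := by
    by_cases hcur : st.2 = []
    · simp [pvMk, hcur]
    · have hpos : 0 < st.2.length := List.length_pos_iff.mpr hcur
      simp [pvMk, hcur, hpos, pvScore_toList, pvCnt, List.foldl_append]
  rw [hfin]
  have h1 := pvSumGen_eq c cp cpp (fun a b _ => decide (a ≠ b))
    (if 0 < st.2.length then st.1 ++ [st.2] else st.1)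
  have h2 := pvSumGen_eq c cp cpp (fun a b d => decide (a ≠ b ∧ d = a))
    (if 0 < st.2.length then st.1 ++ [st.2] else st.1)
  have h3 := pvSumGen_eq c cp cpp (fun a b d => decide (a = b ∧ d ≠ a))
    (if 0 < st.2.length then st.1 ++ [st.2] else st.1)
  unfold pvSumPert pvSumCorr pvSumIntr
  rw [h1, h2, h3, pvCnt_eq_folds]
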